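-- pv_equiv track=rewrite | github.com/kamilwu/aoc2017 | day10.py | to_dense_hash
-- ===== SOURCE A (Python) =====
-- def to_dense_hash(sparse_hash):
--     def chunks(l, n):
--         for i in range(0, len(l), n):
--             xor = 0
--             for item in l[i:i + n]:
--                 xor ^= item
--             yield xor
--     return list(chunks(sparse_hash, 16))
-- ===== SOURCE B (Python) =====
-- def to_dense_hash(sparse_hash):
--     result = [0] * ((len(sparse_hash) + 15) // 16)
--     for i, value in enumerate(sparse_hash):
--         result[i // 16] ^= value
--     return result
-- ===== Notes on version B (the rewrite author's own statement) =====
-- stated objective: alternative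
-- what changed: Replaces the nested chunk-then-fold generator (slice out each 16-element chunk, XOR-fold it) with a single flat scatter pass: preallocate ceil(len/16) zero buckets and XOR each element into result[i // 16] via enumerate.
import Mathlib
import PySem

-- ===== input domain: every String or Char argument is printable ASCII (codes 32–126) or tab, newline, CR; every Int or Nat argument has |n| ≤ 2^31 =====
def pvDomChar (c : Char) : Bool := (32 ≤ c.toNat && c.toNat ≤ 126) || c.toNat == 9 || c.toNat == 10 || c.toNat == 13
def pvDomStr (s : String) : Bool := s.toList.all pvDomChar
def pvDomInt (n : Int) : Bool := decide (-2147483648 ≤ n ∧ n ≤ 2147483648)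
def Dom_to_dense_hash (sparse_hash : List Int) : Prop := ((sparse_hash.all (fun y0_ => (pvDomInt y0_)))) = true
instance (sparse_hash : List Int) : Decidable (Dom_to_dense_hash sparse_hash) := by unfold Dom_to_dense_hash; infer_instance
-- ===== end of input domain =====

-- B replaces A's chunk-then-XOR-fold generator by one flat scatter pass into preallocated buckets (alternative decomposition, same cost).

-- ===== PORT A =====
-- chunks(l, 16): for i in range(0, len(l), 16): xor = 0; for item in l[i:i+16]: xor ^= item; yield xor
def to_dense_hash (sparse_hash : List Int) : List Int :=
  (PySem.List.pyRange 0 (sparse_hash.length : Int) 16).map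
    (fun i => (PySem.List.slice sparse_hash (some i) (some (i + 16))).foldl PySem.Int.bxor 0)

-- ===== PORT B =====
-- result = [0] * ((len+15)//16); for i, value in enumerate(...): result[i//16] ^= value
def to_dense_hash_alt (sparse_hash : List Int) : List Int :=
  (PySem.List.enumerate sparse_hash).foldl
    (fun result p =>
      PySem.List.pySetD result (PySem.Int.floordiv p.1 16)
        (PySem.Int.bxor (PySem.List.pyGetD result (PySem.Int.floordiv p.1 16) 0) p.2))
    (List.replicate ((sparse_hash.length + 15) / 16) (0 : Int))

-- ===== PRECONDITION & SPEC =====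
def Spec_to_dense_hash (sparse_hash : List Int) (out : List Int) : Prop := out = to_dense_hash_alt sparse_hash
instance (sparse_hash : List Int) (out : List Int) : Decidable (Spec_to_dense_hash sparse_hash out) := by unfold Spec_to_dense_hash; infer_instance

-- ===== CLAIM (what is proved, stated in full; the proofs are below) =====
def Claim_equal_to_dense_hash : Prop := ∀ (sparse_hash : List Int), Dom_to_dense_hash sparse_hash → Spec_to_dense_hash sparse_hash (to_dense_hash sparse_hash)

-- ===== LEMMAS AND PROOFS =====

-- B's loop body, named for the proofs
def pvStep (result : List Int) (p : Int × Int) : List Int :=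
  PySem.List.pySetD result (PySem.Int.floordiv p.1 16)
    (PySem.Int.bxor (PySem.List.pyGetD result (PySem.Int.floordiv p.1 16) 0) p.2)

theorem alt_def (l : List Int) :
    to_dense_hash_alt l =
      (PySem.List.enumerate l).foldl pvStep (List.replicate ((l.length + 15) / 16) (0 : Int)) := rfl

-- while the enumerate index stays < 16, the scatter only folds into bucket 0
theorem chunk0 (t : List Int) : ∀ (s : Int) (z : Int) (zs : List Int),
    0 ≤ s → s + t.length ≤ 16 →
    (PySem.List.enumerate t s).foldl pvStep (z :: zs) = (t.foldl PySem.Int.bxor z) :: zs := by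
  induction t with
  | nil => intro s z zs _ _; simp [PySem.List.enumerate]
  | cons v r ih =>
    intro s z zs h0 h1
    rw [PySem.List.enumerate_cons, List.foldl_cons]
    have hd : PySem.Int.floordiv s 16 = 0 := by
      rw [PySem.Int.floordiv_eq_ediv_of_pos (by omega)]
      simp at h1; omega
    have hs : pvStep (z :: zs) (s, v) = (PySem.Int.bxor z v) :: zs := by
      unfold pvStep
      rw [hd, PySem.List.pySetD_of_nonneg _ _ (by norm_num : (0:Int) ≤ 0),
        PySem.List.pyGetD_of_nonneg _ _ (by norm_num : (0:Int) ≤ 0)]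
      simp
    rw [hs, ih (s+1) _ zs (by omega) (by simp at h1 ⊢; omega)]
    simp

-- once the index is ≥ 16, the head bucket is never touched again
theorem shift (r : List Int) : ∀ (s : Int), 16 ≤ s → ∀ (x : Int) (rs : List Int),
    (PySem.List.enumerate r s).foldl pvStep (x :: rs) =
      x :: (PySem.List.enumerate r (s - 16)).foldl pvStep rs := by
  induction r with
  | nil => intro s _ x rs; simp [PySem.List.enumerate]
  | cons v t ih =>
    intro s hs x rs
    rw [PySem.List.enumerate_cons, PySem.List.enumerate_cons, List.foldl_cons, List.foldl_cons]
    have hnn : (0:Int) ≤ PySem.Int.floordiv s 16 := by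
      rw [PySem.Int.floordiv_eq_ediv_of_pos (by omega)]; omega
    have hnn' : (0:Int) ≤ PySem.Int.floordiv (s - 16) 16 := by
      rw [PySem.Int.floordiv_eq_ediv_of_pos (by omega)]; omega
    have hk : (PySem.Int.floordiv s 16).toNat = (PySem.Int.floordiv (s - 16) 16).toNat + 1 := by
      rw [PySem.Int.floordiv_eq_ediv_of_pos (by omega), PySem.Int.floordiv_eq_ediv_of_pos (by omega)]
      omega
    have hstep : pvStep (x :: rs) (s, v) = x :: pvStep rs (s - 16, v) := by
      simp only [pvStep, PySem.List.pySetD_of_nonneg _ _ hnn, PySem.List.pySetD_of_nonneg _ _ hnn',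
        PySem.List.pyGetD_of_nonneg _ _ hnn, PySem.List.pyGetD_of_nonneg _ _ hnn', hk]
      simp
    rw [hstep, ih (s+1) (by omega) x (pvStep rs (s - 16, v))]
    have : s + 1 - 16 = s - 16 + 1 := by omega
    rw [this]

theorem B_step (x : Int) (xs : List Int) :
    to_dense_hash_alt (x :: xs) =
      ((x :: xs).take 16).foldl PySem.Int.bxor 0 :: to_dense_hash_alt ((x :: xs).drop 16) := by
  set l := x :: xs with hl
  have hlen : 1 ≤ l.length := by simp [hl]
  rw [alt_def, alt_def]
  rw [show PySem.List.enumerate l = PySem.List.enumerate (l.take 16 ++ l.drop 16) from by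
    rw [List.take_append_drop]]
  rw [PySem.List.enumerate_append, List.foldl_append]
  have hN : (l.length + 15) / 16 = ((l.length - 16 + 15) / 16) + 1 := by
    by_cases h : l.length ≤ 16 <;> omega
  rw [hN, List.replicate_succ]
  rw [chunk0 (l.take 16) 0 0 _ (le_refl 0) (by simp)]
  by_cases h : l.length ≤ 16
  · have hdrop : l.drop 16 = [] := by simp [List.drop_eq_nil_iff]; omega
    simp [hdrop]
    omega
  · have htk : (l.take 16).length = 16 := by simp; omega
    rw [htk]
    rw [shift (l.drop 16) (0 + (16:Nat)) (by norm_num) _ _]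
    have : ((0:Int) + (16:Nat)) - 16 = 0 := by norm_num
    rw [this]
    have : (l.drop 16).length = l.length - 16 := by simp
    rw [this]

theorem A_nil : to_dense_hash [] = [] := by
  simp [to_dense_hash, PySem.List.pyRange_of_pos 0 0 (by norm_num : (0:Int) < 16)]

theorem A_step (x : Int) (xs : List Int) :
    to_dense_hash (x :: xs) =
      ((x :: xs).take 16).foldl PySem.Int.bxor 0 :: to_dense_hash ((x :: xs).drop 16) := by
  set l := x :: xs with hl
  have hlen : 1 ≤ l.length := by simp [hl]
  have key : ∀ (m : List Int) (k : Nat),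
      PySem.List.slice m (some (0 + 16 * (k : Int))) (some ((0 + 16 * (k : Int)) + 16))
        = (m.drop (16 * k)).take 16 := by
    intro m k
    have e1 : (0 + 16 * (k : Int)) = ((16 * k : Nat) : Int) := by push_cast; ring
    have e2 : ((16 * k : Nat) : Int) + 16 = ((16 * k : Nat) : Int) + ((16 : Nat) : Int) := by
      norm_num
    rw [e1, e2, PySem.List.slice_natCast_add]
  unfold to_dense_hash
  rw [PySem.List.pyRange_of_pos 0 (l.length : Int) (by norm_num : (0:Int) < 16),
      PySem.List.pyRange_of_pos 0 ((l.drop 16).length : Int) (by norm_num : (0:Int) < 16)]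
  have hif : (if (0:Int) < (l.length : Int) then ((((l.length : Int)) - 0 + 16 - 1) / 16).toNat else 0)
      = (l.length + 15) / 16 := by
    rw [if_pos (by exact_mod_cast hlen)]; omega
  have hif2 : (if (0:Int) < ((l.drop 16).length : Int)
      then (((((l.drop 16).length : Int)) - 0 + 16 - 1) / 16).toNat else 0)
      = (l.length - 16 + 15) / 16 := by
    by_cases h : l.length ≤ 16
    · have hz : (l.drop 16).length = 0 := by simp; omega
      rw [hz]
      simp
      omega
    · have hd : (l.drop 16).length = l.length - 16 := by simp
      rw [hd, if_pos (by exact_mod_cast (by omega : 0 < l.length - 16))]; omega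
  have hN : (l.length + 15) / 16 = ((l.length - 16 + 15) / 16) + 1 := by
    by_cases h : l.length ≤ 16 <;> omega
  rw [hif, hif2, hN, List.range_succ_eq_map, List.map_cons, List.map_cons, List.map_map,
    List.map_map, List.map_map]
  congr 1
  · -- head chunk: slice l [0:16] = take 16 l
    simp only [key]
    simp
  · -- chunk k+1 of l is chunk k of l.drop 16
    apply List.map_congr_left
    intro k _
    simp only [Function.comp, Nat.succ_eq_add_one, key, List.drop_drop]
    have h16 : 16 * (k + 1) = 16 + 16 * k := by omega
    rw [h16]

theorem ab_eq : ∀ (l : List Int), to_dense_hash l = to_dense_hash_alt l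
  | [] => by
    rw [A_nil, alt_def]
    simp [PySem.List.enumerate]
  | x :: xs => by
    rw [A_step, B_step, ab_eq ((x :: xs).drop 16)]
  termination_by l => l.length
  decreasing_by simp

-- ===== VERDICT (by name: the statement is the Claim_ definition above) =====
theorem to_dense_hash_spec : Claim_equal_to_dense_hash := by
  intro l _
  unfold Spec_to_dense_hash
  exact ab_eq l
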